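-- pv_equiv track=rewrite | github.com/sourcegraph/CodeScaleBench | scripts/rename_project.py | _rename_suite_in_text
-- ===== SOURCE A (Python) =====
-- SDLC_SUITES = [
--     "debug", "design", "document", "feature", "fix",
--     "refactor", "secure", "test", "understand",
-- ]
--
-- MCP_SUITES = [
--     "compliance", "crossorg", "crossrepo", "crossrepo_tracing",
--     "domain", "incident", "migration", "onboarding", "org",
--     "platform", "security",
-- ]
--
-- def _rename_suite_in_text(text: str) -> str:
--     """Replace ccb_ suite names in text content.
--
--     Handles both ccb_mcp_ (longer prefix, matched first) and ccb_ (SDLC).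
--     Skips ccb_contextbench.
--     """
--     result = text
--
--     # MCP suites first (longer prefix prevents partial matches)
--     # Must do crossrepo_tracing before crossrepo
--     for s in sorted(MCP_SUITES, key=len, reverse=True):
--         result = result.replace(f"ccb_mcp_{s}", f"csb_org_{s}")
--
--     # SDLC suites
--     for s in SDLC_SUITES:
--         result = result.replace(f"ccb_{s}", f"csb_sdlc_{s}")
--
--     # Legacy ccb_build
--     result = result.replace("ccb_build", "csb_sdlc_build")
--
--     return result
-- ===== SOURCE B (Python) =====
-- # Single left-to-right scan over the text with one token -> replacement table,
-- # instead of ~21 sequential full-string .replace passes.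
--
-- # Token table in priority order: the one nested pair (ccb_mcp_crossrepo_tracing
-- # vs ccb_mcp_crossrepo) is listed longest-first so the scan prefers the longer
-- # token, exactly as the replacement order must.
-- _TABLE = [
--     ("ccb_mcp_crossrepo_tracing", "csb_org_crossrepo_tracing"),
--     ("ccb_mcp_compliance", "csb_org_compliance"),
--     ("ccb_mcp_onboarding", "csb_org_onboarding"),
--     ("ccb_mcp_crossrepo", "csb_org_crossrepo"),
--     ("ccb_mcp_migration", "csb_org_migration"),
--     ("ccb_mcp_crossorg", "csb_org_crossorg"),
--     ("ccb_mcp_incident", "csb_org_incident"),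
--     ("ccb_mcp_platform", "csb_org_platform"),
--     ("ccb_mcp_security", "csb_org_security"),
--     ("ccb_mcp_domain", "csb_org_domain"),
--     ("ccb_mcp_org", "csb_org_org"),
--     ("ccb_debug", "csb_sdlc_debug"),
--     ("ccb_design", "csb_sdlc_design"),
--     ("ccb_document", "csb_sdlc_document"),
--     ("ccb_feature", "csb_sdlc_feature"),
--     ("ccb_fix", "csb_sdlc_fix"),
--     ("ccb_refactor", "csb_sdlc_refactor"),
--     ("ccb_secure", "csb_sdlc_secure"),
--     ("ccb_test", "csb_sdlc_test"),
--     ("ccb_understand", "csb_sdlc_understand"),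
--     ("ccb_build", "csb_sdlc_build"),
-- ]
--
--
-- def _rename_suite_in_text(text: str) -> str:
--     out = []
--     i = 0
--     n = len(text)
--     while i < n:
--         for tok, rep in _TABLE:
--             if text.startswith(tok, i):
--                 out.append(rep)
--                 i += len(tok)
--                 break
--         else:
--             out.append(text[i])
--             i += 1
--     return "".join(out)
-- ===== Notes on version B (the rewrite author's own statement) =====
-- stated objective: alternative
-- what changed: A runs 21 sequential full-string .replace passes (one per suite token); B builds one token-to-replacement table and emits the output in a single left-to-right scan of the text, trying the table at each position (the nested pair crossrepo_tracing/crossrepo listed longest-first).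
import Mathlib
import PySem

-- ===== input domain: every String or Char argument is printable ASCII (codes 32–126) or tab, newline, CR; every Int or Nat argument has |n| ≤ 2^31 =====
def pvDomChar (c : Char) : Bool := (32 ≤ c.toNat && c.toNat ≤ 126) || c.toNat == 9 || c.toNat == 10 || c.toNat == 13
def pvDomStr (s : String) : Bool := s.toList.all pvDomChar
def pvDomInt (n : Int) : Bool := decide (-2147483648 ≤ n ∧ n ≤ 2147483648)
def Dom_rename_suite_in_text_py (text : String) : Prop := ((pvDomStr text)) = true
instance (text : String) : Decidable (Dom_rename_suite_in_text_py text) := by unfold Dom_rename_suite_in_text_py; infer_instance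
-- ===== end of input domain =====

-- B replaces A's 21 sequential full-string .replace passes by one token table and a
-- single left-to-right scan (alternative decomposition, same exact output).

-- ===== PORT A =====
def pvSDLC_SUITES : List String :=
  ["debug", "design", "document", "feature", "fix", "refactor", "secure", "test", "understand"]

def pvMCP_SUITES : List String :=
  ["compliance", "crossorg", "crossrepo", "crossrepo_tracing", "domain", "incident",
   "migration", "onboarding", "org", "platform", "security"]

def rename_suite_in_text_py (text : String) : String :=
  let result := text
  -- for s in sorted(MCP_SUITES, key=len, reverse=True): result = result.replace(f"ccb_mcp_{s}", f"csb_org_{s}")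
  let result := (PySem.List.sorted pvMCP_SUITES (fun s => PySem.Str.len s) true).foldl
    (fun result s => PySem.Str.replace result ("ccb_mcp_" ++ s) ("csb_org_" ++ s)) result
  -- for s in SDLC_SUITES: result = result.replace(f"ccb_{s}", f"csb_sdlc_{s}")
  let result := pvSDLC_SUITES.foldl
    (fun result s => PySem.Str.replace result ("ccb_" ++ s) ("csb_sdlc_" ++ s)) result
  PySem.Str.replace result "ccb_build" "csb_sdlc_build"

-- ===== PORT B =====
-- Source B's _TABLE literal
def pvTable : List (String × String) :=
  [("ccb_mcp_crossrepo_tracing", "csb_org_crossrepo_tracing"),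
   ("ccb_mcp_compliance", "csb_org_compliance"),
   ("ccb_mcp_onboarding", "csb_org_onboarding"),
   ("ccb_mcp_crossrepo", "csb_org_crossrepo"),
   ("ccb_mcp_migration", "csb_org_migration"),
   ("ccb_mcp_crossorg", "csb_org_crossorg"),
   ("ccb_mcp_incident", "csb_org_incident"),
   ("ccb_mcp_platform", "csb_org_platform"),
   ("ccb_mcp_security", "csb_org_security"),
   ("ccb_mcp_domain", "csb_org_domain"),
   ("ccb_mcp_org", "csb_org_org"),
   ("ccb_debug", "csb_sdlc_debug"),
   ("ccb_design", "csb_sdlc_design"),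
   ("ccb_document", "csb_sdlc_document"),
   ("ccb_feature", "csb_sdlc_feature"),
   ("ccb_fix", "csb_sdlc_fix"),
   ("ccb_refactor", "csb_sdlc_refactor"),
   ("ccb_secure", "csb_sdlc_secure"),
   ("ccb_test", "csb_sdlc_test"),
   ("ccb_understand", "csb_sdlc_understand"),
   ("ccb_build", "csb_sdlc_build")]

def pvTableL : List (List Char × List Char) := pvTable.map (fun p => (p.1.toList, p.2.toList))

-- Source B's while loop over the remaining text; the Nat argument is the loop bound
-- (remaining length), only there to make the recursion structural.
def pvScanGo : Nat → List Char → List Char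
  | 0, _ => []
  | fuel + 1, l =>
    match pvTableL.find? (fun p => p.1.isPrefixOf l) with
    | some pr => pr.2 ++ pvScanGo fuel (l.drop pr.1.length)
    | none =>
      match l with
      | [] => []
      | c :: t => c :: pvScanGo fuel t

def rename_suite_in_text_py_alt (text : String) : String :=
  String.ofList (pvScanGo text.toList.length text.toList)

-- ===== PRECONDITION & SPEC =====
def Spec_rename_suite_in_text_py (text : String) (out : String) : Prop := out = rename_suite_in_text_py_alt text
instance (text : String) (out : String) : Decidable (Spec_rename_suite_in_text_py text out) := by unfold Spec_rename_suite_in_text_py; infer_instance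

-- ===== CLAIM (what is proved, stated in full; the proofs are below) =====
def Claim_equal_rename_suite_in_text_py : Prop := ∀ (text : String), Dom_rename_suite_in_text_py text → Spec_rename_suite_in_text_py text (rename_suite_in_text_py text)

-- ===== LEMMAS AND PROOFS =====

-- A's pass list, as (token, replacement) pairs over List Char
def pvChain (ps : List (List Char × List Char)) (l : List Char) : List Char :=
  ps.foldl (fun r p => PySem.Chars.replace r p.1 p.2) l

-- v and all its suffixes are prefix-incomparable with rep
def pvSepB (v rep : List Char) : Prop :=
  ∀ q < v.length, ¬ (v.drop q <+: rep) ∧ ¬ (rep <+: v.drop q)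

-- replace.go with enough fuel computes replace (accumulator made explicit)
lemma pv_go_spec (old new : List Char) (hne : old ≠ []) :
    ∀ fuel l acc, l.length ≤ fuel →
      PySem.Chars.replace.go old new fuel l acc = acc.reverse ++ PySem.Chars.replace l old new := by
  intro fuel
  induction fuel using Nat.strong_induction_on with
  | _ fuel ih =>
    intro l acc hlen
    match fuel, l with
    | 0, l =>
      interval_cases hl : l.length
      · have : l = [] := List.length_eq_zero_iff.mp (by omega)
        subst this
        simp [PySem.Chars.replace.go, PySem.Chars.replace, hne]
    | f + 1, [] =>
      simp [PySem.Chars.replace.go, PySem.Chars.replace, hne]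
    | f + 1, c :: t =>
      have hne' : old.isEmpty = false := by simpa [List.isEmpty_iff] using hne
      have hlen' : t.length ≤ f := by simpa using hlen
      have hold1 : 1 ≤ old.length := by
        cases old with | nil => exact absurd rfl hne | cons a b => simp
      rw [PySem.Chars.replace.go]
      by_cases hp : old.isPrefixOf (c :: t)
      · simp only [hp, if_true]
        rw [ih f (by omega) ((c :: t).drop old.length) (new.reverse ++ acc) (by simp; omega)]
        conv_rhs => rw [PySem.Chars.replace]
        simp only [hne', Bool.false_eq_true, if_false]
        rw [show (c :: t).length = t.length + 1 from by simp, PySem.Chars.replace.go]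
        simp only [hp, if_true]
        rw [ih t.length (by omega) ((c :: t).drop old.length) (new.reverse ++ []) (by simp; omega)]
        simp
      · simp only [hp]
        rw [ih f (by omega) t (c :: acc) hlen']
        conv_rhs => rw [PySem.Chars.replace]
        simp only [hne', Bool.false_eq_true, if_false]
        rw [show (c :: t).length = t.length + 1 from by simp, PySem.Chars.replace.go]
        simp only [hp]
        rw [ih t.length (by omega) t [c] le_rfl]
        simp

lemma pv_replace_nil (old new : List Char) (hne : old ≠ []) :
    PySem.Chars.replace [] old new = [] := by
  have hne' : old.isEmpty = false := by simpa [List.isEmpty_iff] using hne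
  rw [PySem.Chars.replace]
  simp [hne', PySem.Chars.replace.go]

lemma pv_replace_pos (old new l : List Char) (hne : old ≠ []) (h : old <+: l) :
    PySem.Chars.replace l old new = new ++ PySem.Chars.replace (l.drop old.length) old new := by
  have hne' : old.isEmpty = false := by simpa [List.isEmpty_iff] using hne
  have hold1 : 1 ≤ old.length := by
    cases old with | nil => exact absurd rfl hne | cons a b => simp
  cases l with
  | nil => rw [List.prefix_nil] at h; exact absurd h hne
  | cons c t =>
    have hp : old.isPrefixOf (c :: t) = true := List.isPrefixOf_iff_prefix.mpr h
    rw [PySem.Chars.replace]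
    simp only [hne', Bool.false_eq_true, if_false]
    rw [show (c :: t).length = t.length + 1 from by simp, PySem.Chars.replace.go]
    simp only [hp, if_true]
    rw [pv_go_spec old new hne t.length ((c :: t).drop old.length) (new.reverse ++ []) (by simp; omega)]
    simp

lemma pv_replace_cons (old new : List Char) (hne : old ≠ []) (c : Char) (t : List Char)
    (h : ¬ old <+: c :: t) :
    PySem.Chars.replace (c :: t) old new = c :: PySem.Chars.replace t old new := by
  have hne' : old.isEmpty = false := by simpa [List.isEmpty_iff] using hne
  have hp : old.isPrefixOf (c :: t) = false := by
    rw [Bool.eq_false_iff]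
    intro hx
    exact h (List.isPrefixOf_iff_prefix.mp hx)
  rw [PySem.Chars.replace]
  simp only [hne', Bool.false_eq_true, if_false]
  rw [show (c :: t).length = t.length + 1 from by simp, PySem.Chars.replace.go]
  simp only [hp, Bool.false_eq_true, if_false]
  rw [pv_go_spec old new hne t.length t (c :: []) le_rfl]
  simp

lemma pv_not_prefix_append {u x old : List Char} (h1 : ¬ old <+: u) (h2 : ¬ u <+: old) :
    ¬ old <+: u ++ x := by
  intro h
  rcases List.prefix_or_prefix_of_prefix h (List.prefix_append u x) with h' | h'
  · exact h1 h'
  · exact h2 h'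

lemma pv_replace_append (old new : List Char) (hne : old ≠ []) :
    ∀ (u x : List Char), (∀ p < u.length, ¬ old <+: u.drop p ++ x) →
      PySem.Chars.replace (u ++ x) old new = u ++ PySem.Chars.replace x old new := by
  intro u
  induction u with
  | nil => intro x _; simp
  | cons c u' ih =>
    intro x h
    have h0 : ¬ old <+: c :: (u' ++ x) := by simpa using h 0 (by simp)
    rw [List.cons_append, pv_replace_cons old new hne c (u' ++ x) h0,
      ih x (fun p hp => by simpa using h (p + 1) (by simpa using hp))]
    simp

lemma pv_sepB_drop1 {v rep : List Char} (h : pvSepB v rep) : pvSepB (v.drop 1) rep := by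
  intro q hq
  have := h (q + 1) (by simp at hq ⊢; omega)
  simpa [List.drop_drop] using this

-- a replacement pass cannot create a new prefix v (v prefix-separated from rep)
lemma pv_noCreate (old rep : List Char) (hold : old ≠ []) :
    ∀ (s v : List Char), pvSepB v rep → v <+: PySem.Chars.replace s old rep → v <+: s := by
  intro s
  induction s with
  | nil =>
    intro v _ hv
    rw [pv_replace_nil old rep hold] at hv
    exact hv
  | cons c t ih =>
    intro v hsep hv
    by_cases hm : old <+: (c :: t)
    · rw [pv_replace_pos old rep (c :: t) hold hm] at hv
      cases v with
      | nil => simp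
      | cons a v' =>
        rcases List.prefix_or_prefix_of_prefix hv (List.prefix_append rep _) with h' | h'
        · exact absurd h' (by simpa using (hsep 0 (by simp)).1)
        · exact absurd h' (by simpa using (hsep 0 (by simp)).2)
    · rw [pv_replace_cons old rep hold c t hm] at hv
      cases v with
      | nil => simp
      | cons a v' =>
        rw [List.cons_prefix_cons] at hv
        obtain ⟨rfl, hv'⟩ := hv
        have : v' <+: t := ih v' (by simpa using pv_sepB_drop1 hsep) hv'
        exact List.cons_prefix_cons.mpr ⟨rfl, this⟩

lemma pv_chainApp (u : List Char) :
    ∀ (ps : List (List Char × List Char)) (x : List Char),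
      (∀ pr ∈ ps, pr.1 ≠ [] ∧ ∀ p < u.length, ¬ pr.1 <+: u.drop p ∧ ¬ u.drop p <+: pr.1) →
      pvChain ps (u ++ x) = u ++ pvChain ps x := by
  intro ps
  induction ps with
  | nil => intro x _; simp [pvChain]
  | cons pr0 ps' ih =>
    intro x h
    obtain ⟨hne0, hsafe0⟩ := h pr0 List.mem_cons_self
    have hstep : PySem.Chars.replace (u ++ x) pr0.1 pr0.2 = u ++ PySem.Chars.replace x pr0.1 pr0.2 :=
      pv_replace_append pr0.1 pr0.2 hne0 u x
        (fun p hp => pv_not_prefix_append (hsafe0 p hp).1 (hsafe0 p hp).2)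
    show pvChain ps' (PySem.Chars.replace (u ++ x) pr0.1 pr0.2)
        = u ++ pvChain ps' (PySem.Chars.replace x pr0.1 pr0.2)
    rw [hstep]
    exact ih _ (fun pr hm => h pr (List.mem_cons_of_mem _ hm))

lemma pv_chainCons (c : Char) :
    ∀ (ps : List (List Char × List Char)) (x : List Char),
      (∀ pr ∈ ps, pr.1 ≠ []) →
      (∀ pr ∈ ps, ¬ pr.1 <+: c :: x) →
      (∀ pr ∈ ps, ∀ pr' ∈ ps, pvSepB (pr.1.drop 1) pr'.2) →
      pvChain ps (c :: x) = c :: pvChain ps x := by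
  intro ps
  induction ps with
  | nil => intro x _ _ _; simp [pvChain]
  | cons pr0 ps' ih =>
    intro x hne hnp hsep
    have hne0 : pr0.1 ≠ [] := hne pr0 List.mem_cons_self
    have h0 : ¬ pr0.1 <+: c :: x := hnp pr0 List.mem_cons_self
    show pvChain ps' (PySem.Chars.replace (c :: x) pr0.1 pr0.2)
        = c :: pvChain ps' (PySem.Chars.replace x pr0.1 pr0.2)
    rw [pv_replace_cons pr0.1 pr0.2 hne0 c x h0]
    apply ih (PySem.Chars.replace x pr0.1 pr0.2)
    · exact fun pr hm => hne pr (List.mem_cons_of_mem _ hm)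
    · intro pr hm hpre
      have hnepr : pr.1 ≠ [] := hne pr (List.mem_cons_of_mem _ hm)
      cases hpr1 : pr.1 with
      | nil => exact hnepr hpr1
      | cons a w =>
        rw [hpr1, List.cons_prefix_cons] at hpre
        obtain ⟨rfl, hw⟩ := hpre
        have hsepw : pvSepB w pr0.2 := by
          have := hsep pr (List.mem_cons_of_mem _ hm) pr0 List.mem_cons_self
          rw [hpr1] at this; simpa using this
        have : w <+: x := pv_noCreate pr0.1 pr0.2 hne0 x w hsepw hw
        exact hnp pr (List.mem_cons_of_mem _ hm) (by rw [hpr1]; exact List.cons_prefix_cons.mpr ⟨rfl, this⟩)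
    · exact fun pr hm pr' hm' =>
        hsep pr (List.mem_cons_of_mem _ hm) pr' (List.mem_cons_of_mem _ hm')

lemma pv_chainPre (t : List Char) :
    ∀ (ps : List (List Char × List Char)) (x : List Char),
      (∀ pr ∈ ps, pr.1 ≠ []) →
      (∀ pr ∈ ps, ∀ p < t.length, 0 < p → ¬ pr.1 <+: t.drop p ∧ ¬ t.drop p <+: pr.1) →
      (∀ pr ∈ ps, ¬ pr.1 <+: t) →
      (∀ pr ∈ ps, t <+: pr.1 → ¬ pr.1.drop t.length <+: x) →
      (∀ pr ∈ ps, ∀ pr' ∈ ps, t <+: pr.1 → pvSepB (pr.1.drop t.length) pr'.2) →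
      pvChain ps (t ++ x) = t ++ pvChain ps x := by
  intro ps
  induction ps with
  | nil => intro x _ _ _ _ _; simp [pvChain]
  | cons pr0 ps' ih =>
    intro x hne hint hb hd hsep
    have hne0 : pr0.1 ≠ [] := hne pr0 List.mem_cons_self
    have h0 : ¬ pr0.1 <+: t ++ x := by
      intro h
      rcases List.prefix_or_prefix_of_prefix h (List.prefix_append t x) with h' | h'
      · exact hb pr0 List.mem_cons_self h'
      · have heq : t ++ pr0.1.drop t.length = pr0.1 := List.prefix_iff_eq_append.mp h'
        have : pr0.1.drop t.length <+: x := by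
          rw [← heq] at h
          exact (List.prefix_append_right_inj t).mp h
        exact hd pr0 List.mem_cons_self h' this
    have hstep : PySem.Chars.replace (t ++ x) pr0.1 pr0.2 = t ++ PySem.Chars.replace x pr0.1 pr0.2 := by
      apply pv_replace_append pr0.1 pr0.2 hne0 t x
      intro p hp
      rcases Nat.eq_zero_or_pos p with rfl | hppos
      · simpa using h0
      · exact pv_not_prefix_append (hint pr0 List.mem_cons_self p hp hppos).1
          (hint pr0 List.mem_cons_self p hp hppos).2
    show pvChain ps' (PySem.Chars.replace (t ++ x) pr0.1 pr0.2)
        = t ++ pvChain ps' (PySem.Chars.replace x pr0.1 pr0.2)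
    rw [hstep]
    apply ih (PySem.Chars.replace x pr0.1 pr0.2)
    · exact fun pr hm => hne pr (List.mem_cons_of_mem _ hm)
    · exact fun pr hm => hint pr (List.mem_cons_of_mem _ hm)
    · exact fun pr hm => hb pr (List.mem_cons_of_mem _ hm)
    · intro pr hm hpre hdrop
      have hsepw : pvSepB (pr.1.drop t.length) pr0.2 :=
        hsep pr (List.mem_cons_of_mem _ hm) pr0 List.mem_cons_self hpre
      have : pr.1.drop t.length <+: x :=
        pv_noCreate pr0.1 pr0.2 hne0 x _ hsepw hdrop
      exact hd pr (List.mem_cons_of_mem _ hm) hpre this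
    · exact fun pr hm pr' hm' =>
        hsep pr (List.mem_cons_of_mem _ hm) pr' (List.mem_cons_of_mem _ hm')

-- concrete facts about the table, checked by decide
lemma pvF_ne : ∀ pr ∈ pvTableL, pr.1 ≠ [] := by decide

lemma pvF_int : ∀ pr ∈ pvTableL, ∀ pr' ∈ pvTableL,
    ∀ p < pr.1.length, 0 < p → ¬ pr'.1 <+: pr.1.drop p ∧ ¬ pr.1.drop p <+: pr'.1 := by decide

lemma pvF_sep1 : ∀ pr ∈ pvTableL, ∀ pr' ∈ pvTableL, pvSepB (pr.1.drop 1) pr'.2 := by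
  unfold pvSepB; decide

lemma pvF_sepT : ∀ prT ∈ pvTableL, ∀ prU ∈ pvTableL, ∀ prR ∈ pvTableL,
    prT.1 <+: prU.1 → pvSepB (prU.1.drop prT.1.length) prR.2 := by
  unfold pvSepB; decide

lemma pvF_rep : ∀ pr ∈ pvTableL, ∀ pr' ∈ pvTableL,
    ∀ p < pr.2.length, ¬ pr'.1 <+: pr.2.drop p ∧ ¬ pr.2.drop p <+: pr'.1 := by decide

lemma pv_scanGo_irrel : ∀ (f : Nat) (l : List Char), l.length ≤ f →
    pvScanGo f l = pvScanGo l.length l := by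
  intro f
  induction f using Nat.strong_induction_on with
  | _ f ih =>
    intro l hlen
    match f, l with
    | 0, l =>
      have : l = [] := List.length_eq_zero_iff.mp (by omega)
      subst this; rfl
    | f + 1, l =>
      cases hf : pvTableL.find? (fun p => p.1.isPrefixOf l) with
      | none =>
        cases l with
        | nil => simp only [pvScanGo, hf, List.length_nil]
        | cons c tl =>
          rw [show (c :: tl).length = tl.length + 1 from by simp]
          simp only [pvScanGo, hf]
          rw [ih f (by omega) tl (by simpa using hlen), ih tl.length (by simp at hlen; omega) tl le_rfl]
      | some pr =>
        have hmem : pr ∈ pvTableL := List.mem_of_find?_eq_some hf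
        have hpre : pr.1 <+: l := by
          have h' := List.find?_some hf
          exact List.isPrefixOf_iff_prefix.mp (by simpa using h')
        have hne : pr.1 ≠ [] := pvF_ne pr hmem
        have hk1 : 0 < pr.1.length := List.length_pos_iff.mpr hne
        have hlpos : 0 < l.length := lt_of_lt_of_le hk1 hpre.length_le
        rw [show l.length = (l.length - 1) + 1 from by omega]
        simp only [pvScanGo, hf]
        have hd : (l.drop pr.1.length).length ≤ l.length - 1 := by simp; omega
        rw [ih f (by omega) (l.drop pr.1.length) (by omega),
          ih (l.length - 1) (by omega) (l.drop pr.1.length) hd]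

lemma pv_chain_eq_scan : ∀ (n : Nat) (l : List Char), l.length ≤ n →
    pvChain pvTableL l = pvScanGo l.length l := by
  intro n
  induction n with
  | zero =>
    intro l hlen
    have : l = [] := List.length_eq_zero_iff.mp (by omega)
    subst this; decide
  | succ n ih =>
    intro l hlen
    cases hf : pvTableL.find? (fun p => p.1.isPrefixOf l) with
    | none =>
      have hnp : ∀ pr ∈ pvTableL, ¬ pr.1 <+: l := by
        intro pr hm hp
        have := List.find?_eq_none.mp hf pr hm
        exact this (List.isPrefixOf_iff_prefix.mpr hp)
      cases l with
      | nil => decide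
      | cons c tl =>
        rw [pv_chainCons c pvTableL tl pvF_ne hnp pvF_sep1,
          ih tl (by simp at hlen; omega)]
        rw [show (c :: tl).length = tl.length + 1 from by simp]
        simp only [pvScanGo, hf]
    | some pr =>
      obtain ⟨hp, as, bs, htab, hearl⟩ := List.find?_eq_some_iff_append.mp hf
      have hpre : pr.1 <+: l := List.isPrefixOf_iff_prefix.mp (by simpa using hp)
      have hmem : pr ∈ pvTableL := by
        rw [htab]; exact List.mem_append_right _ List.mem_cons_self
      have hne : pr.1 ≠ [] := pvF_ne pr hmem
      have hk1 : 0 < pr.1.length := List.length_pos_iff.mpr hne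
      have hlpos : 0 < l.length := lt_of_lt_of_le hk1 hpre.length_le
      have hlr : pr.1 ++ l.drop pr.1.length = l := List.prefix_iff_eq_append.mp hpre
      have hsub_as : ∀ q ∈ as, q ∈ pvTableL := by
        rw [htab]; intro q hq; exact List.mem_append_left _ hq
      have hsub_bs : ∀ q ∈ bs, q ∈ pvTableL := by
        rw [htab]; intro q hq
        exact List.mem_append_right _ (List.mem_cons_of_mem _ hq)
      have hearl' : ∀ q ∈ as, ¬ q.1 <+: l := by
        intro q hq hp'
        have := hearl q hq
        simp only [Bool.not_eq_eq_eq_not, Bool.not_true] at this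
        rw [Bool.eq_false_iff] at this
        exact this (List.isPrefixOf_iff_prefix.mpr hp')
      have hsplit : ∀ m : List Char,
          pvChain pvTableL m = pvChain bs (PySem.Chars.replace (pvChain as m) pr.1 pr.2) := by
        intro m; rw [htab]; simp [pvChain, List.foldl_append]
      have h2 : pvChain as l = pr.1 ++ pvChain as (l.drop pr.1.length) := by
        conv_lhs => rw [← hlr]
        apply pv_chainPre pr.1 as (l.drop pr.1.length)
        · exact fun q hq => pvF_ne q (hsub_as q hq)
        · exact fun q hq => pvF_int pr hmem q (hsub_as q hq)
        · intro q hq hqt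
          exact hearl' q hq (hqt.trans (hlr ▸ List.prefix_append pr.1 (l.drop pr.1.length)))
        · intro q hq htq hdrop
          apply hearl' q hq
          conv_rhs => rw [← hlr]
          have heq : pr.1 ++ q.1.drop pr.1.length = q.1 := List.prefix_iff_eq_append.mp htq
          rw [← heq]
          exact (List.prefix_append_right_inj pr.1).mpr hdrop
        · exact fun q hq q' hq' htq =>
            pvF_sepT pr hmem q (hsub_as q hq) q' (hsub_as q' hq') htq
      have h3 : PySem.Chars.replace (pr.1 ++ pvChain as (l.drop pr.1.length)) pr.1 pr.2
          = pr.2 ++ PySem.Chars.replace (pvChain as (l.drop pr.1.length)) pr.1 pr.2 := by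
        rw [pv_replace_pos pr.1 pr.2 _ hne (List.prefix_append _ _), List.drop_left]
      have h4 : pvChain bs (pr.2 ++ PySem.Chars.replace (pvChain as (l.drop pr.1.length)) pr.1 pr.2)
          = pr.2 ++ pvChain bs (PySem.Chars.replace (pvChain as (l.drop pr.1.length)) pr.1 pr.2) := by
        apply pv_chainApp pr.2 bs
        intro q hq
        exact ⟨pvF_ne q (hsub_bs q hq), fun p hp => pvF_rep pr hmem q (hsub_bs q hq) p hp⟩
      have hmain : pvChain pvTableL l = pr.2 ++ pvChain pvTableL (l.drop pr.1.length) := by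
        rw [hsplit l, h2, h3, h4, ← hsplit (l.drop pr.1.length)]
      have hrlen : (l.drop pr.1.length).length ≤ n := by simp; omega
      rw [hmain, ih (l.drop pr.1.length) hrlen]
      rw [show l.length = (l.length - 1) + 1 from by omega]
      simp only [pvScanGo, hf]
      rw [pv_scanGo_irrel (l.length - 1) (l.drop pr.1.length) (by simp; omega)]

lemma pv_chain_append (ps qs : List (List Char × List Char)) (l : List Char) :
    pvChain (ps ++ qs) l = pvChain qs (pvChain ps l) := by
  simp [pvChain, List.foldl_append]

lemma pv_chainS_map (p q : String) :
    ∀ (suites : List String) (tx : String),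
      (suites.foldl (fun r s => PySem.Str.replace r (p ++ s) (q ++ s)) tx).toList
        = pvChain (suites.map (fun s => ((p ++ s).toList, (q ++ s).toList))) tx.toList := by
  intro suites
  induction suites with
  | nil => intro tx; simp [pvChain]
  | cons s rest ih =>
    intro tx
    rw [List.foldl_cons, ih (PySem.Str.replace tx (p ++ s) (q ++ s)), List.map_cons]
    simp [pvChain, PySem.Str.toList_replace]

lemma pv_A_toList (text : String) :
    (rename_suite_in_text_py text).toList = pvChain pvTableL text.toList := by
  have hs : PySem.List.sorted pvMCP_SUITES (fun s => PySem.Str.len s) true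
      = ["crossrepo_tracing", "compliance", "onboarding", "crossrepo", "migration",
         "crossorg", "incident", "platform", "security", "domain", "org"] := by decide
  have htab : pvTableL =
      (["crossrepo_tracing", "compliance", "onboarding", "crossrepo", "migration",
        "crossorg", "incident", "platform", "security", "domain", "org"].map
          (fun s => (("ccb_mcp_" ++ s).toList, ("csb_org_" ++ s).toList)))
      ++ ((pvSDLC_SUITES.map
          (fun s => (("ccb_" ++ s).toList, ("csb_sdlc_" ++ s).toList)))
      ++ [("ccb_build".toList, "csb_sdlc_build".toList)]) := by decide
  unfold rename_suite_in_text_py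
  rw [PySem.Str.toList_replace, pv_chainS_map "ccb_" "csb_sdlc_", hs,
    pv_chainS_map "ccb_mcp_" "csb_org_", htab, pv_chain_append, pv_chain_append]
  simp [pvChain]

-- ===== VERDICT (by name: the statement is the Claim_ definition above) =====
theorem rename_suite_in_text_py_spec : Claim_equal_rename_suite_in_text_py := by
  intro text _
  unfold Spec_rename_suite_in_text_py rename_suite_in_text_py_alt
  rw [← String.toList_inj, pv_A_toList, String.toList_ofList]
  exact pv_chain_eq_scan text.toList.length text.toList le_rfl
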